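-- pv_equiv track=rewrite | github.com/scottjoyner/lineage | lineage-compare/compare/compare_lineage.py | bfs_metrics
-- ===== SOURCE A (Python) =====
-- from collections import defaultdict, deque
-- from typing import Dict, Set, Tuple, Iterable, List
--
-- def bfs_metrics(adj: Dict[str, Set[str]], src: str, max_depth: int) -> Tuple[Set[str], Dict[str,int], int]:
--     dist: Dict[str,int] = {src: 0}
--     q: deque[str] = deque([src])
--     while q:
--         u = q.popleft()
--         if dist[u] >= max_depth:
--             continue
--         for v in adj.get(u, ()):
--             if v not in dist:
--                 dist[v] = dist[u] + 1
--                 q.append(v)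
--     reachable = set(dist.keys()) - {src}
--     max_hops = max(dist.values()) if dist else 0
--     return reachable, dist, max_hops
-- ===== SOURCE B (Python) =====
-- def bfs_metrics(adj, src, max_depth):
--     dist = {src: 0}
--     frontier = [src]
--     d = 0
--     while d < max_depth and frontier:
--         nxt = []
--         for u in frontier:
--             for v in adj.get(u, ()):
--                 if v not in dist:
--                     dist[v] = d + 1
--                     nxt.append(v)
--         frontier = nxt
--         d += 1
--     reachable = set(dist.keys()) - {src}
--     max_hops = max(dist.values()) if dist else 0
--     return reachable, dist, max_hops
-- ===== Notes on version B (the rewrite author's own statement) =====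
-- stated objective: alternative
-- what changed: Replaces the deque-based node-at-a-time BFS with per-node depth guard by a level-synchronous BFS: a loop over depth levels that expands the whole frontier at once and stops after max_depth levels or when the frontier empties, so no depth comparison per popped node is needed.
import Mathlib
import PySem

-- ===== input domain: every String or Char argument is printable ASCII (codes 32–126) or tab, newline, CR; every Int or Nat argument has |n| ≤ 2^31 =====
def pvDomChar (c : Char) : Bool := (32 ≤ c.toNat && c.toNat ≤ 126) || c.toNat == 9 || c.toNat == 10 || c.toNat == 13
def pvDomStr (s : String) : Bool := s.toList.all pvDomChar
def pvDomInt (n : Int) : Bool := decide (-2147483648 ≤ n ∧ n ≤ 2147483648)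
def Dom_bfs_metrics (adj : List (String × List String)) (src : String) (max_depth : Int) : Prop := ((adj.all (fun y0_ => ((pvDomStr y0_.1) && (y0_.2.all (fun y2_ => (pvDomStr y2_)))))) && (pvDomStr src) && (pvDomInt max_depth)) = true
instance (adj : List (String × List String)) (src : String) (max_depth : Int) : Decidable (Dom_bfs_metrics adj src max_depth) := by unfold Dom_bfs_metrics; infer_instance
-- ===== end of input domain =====

-- B replaces A's deque-based node-at-a-time BFS (per-node depth guard) by a level-synchronous
-- BFS bounded by max_depth levels; same return value, an alternative decomposition.

-- ===== PORT A =====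
-- inner 'for v in adj.get(u, ()):' loop of A; state = (dist, q)
def pvInnerA (u : String) (st : PySem.Dict String Int × List String) (vs : List String) :
    PySem.Dict String Int × List String :=
  vs.foldl (fun st v =>
    if st.1.contains v then st
    else (st.1.insert v (st.1.getD u 0 + 1), st.2 ++ [v])) st

-- measure bookkeeping for the while-loop's termination (cited by loopA's decreasing_by)
def pvMeasureA (univ : Finset String) (st : PySem.Dict String Int × List String) : Nat :=
  (univ.filter (fun k => st.1.contains k = false)).card + st.2.length

theorem pvInnerA_cons (u v : String) (st : PySem.Dict String Int × List String)
    (vs : List String) :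
    pvInnerA u st (v :: vs) =
      pvInnerA u (if st.1.contains v then st
        else (st.1.insert v (st.1.getD u 0 + 1), st.2 ++ [v])) vs := rfl

theorem pvInnerA_measure (univ : Finset String) (u : String)
    (st : PySem.Dict String Int × List String) (vs : List String)
    (hvs : ∀ v ∈ vs, v ∈ univ) :
    pvMeasureA univ (pvInnerA u st vs) ≤ pvMeasureA univ st := by
  induction vs generalizing st with
  | nil => exact le_refl _
  | cons v vs ih =>
    rw [pvInnerA_cons]
    by_cases hc : st.1.contains v = true
    · rw [if_pos hc]
      exact ih st (fun w hw => hvs w (List.mem_cons_of_mem _ hw))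
    · have hc' : st.1.contains v = false := by simpa using hc
      rw [if_neg (by simp [hc'])]
      refine le_trans (ih _ (fun w hw => hvs w (List.mem_cons_of_mem _ hw))) ?_
      unfold pvMeasureA
      have hfe : (univ.filter (fun k => (st.1.insert v (st.1.getD u 0 + 1)).contains k = false))
          = (univ.filter (fun k => st.1.contains k = false)).erase v := by
        ext k
        simp only [Finset.mem_filter, Finset.mem_erase, PySem.Dict.contains_insert]
        constructor
        · rintro ⟨hk, hf⟩
          simp only [Bool.or_eq_false_iff, beq_eq_false_iff_ne] at hf
          exact ⟨hf.1, hk, hf.2⟩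
        · rintro ⟨hne, hk, hf⟩
          refine ⟨hk, ?_⟩
          simp [hne, hf]
      have hvmem : v ∈ (univ.filter (fun k => st.1.contains k = false)) :=
        Finset.mem_filter.mpr ⟨hvs v (List.mem_cons_self), hc'⟩
      rw [hfe, Finset.card_erase_of_mem hvmem]
      have hpos : 0 < (univ.filter (fun k => st.1.contains k = false)).card :=
        Finset.card_pos.mpr ⟨v, hvmem⟩
      simp only [List.length_append, List.length_cons, List.length_nil]
      omega

theorem pvAdj_getD_mem_flatten (adj : PySem.Dict String (List String)) (u : String) :
    ∀ v ∈ adj.getD u [], v ∈ adj.values.flatten := by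
  intro v hv
  rcases h : adj.get? u with _ | l
  · simp [PySem.Dict.getD_eq_get?_getD, h] at hv
  · have hl : adj.getD u [] = l := by simp [PySem.Dict.getD_eq_get?_getD, h]
    rw [hl] at hv
    have : (u, l) ∈ adj.items := PySem.Dict.mem_items_of_get?_eq_some _ h
    have hlv : l ∈ adj.values := by
      simp only [PySem.Dict.values]
      exact List.mem_map.mpr ⟨(u, l), this, rfl⟩
    exact List.mem_flatten.mpr ⟨l, hlv, hv⟩

-- A's while loop over the deque q
def pvLoopA (adj : PySem.Dict String (List String)) (maxd : Int)
    (dist : PySem.Dict String Int) (q : List String) : PySem.Dict String Int :=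
  match q with
  | [] => dist
  | u :: q' =>
    if dist.getD u 0 ≥ maxd then pvLoopA adj maxd dist q'
    else
      let st := pvInnerA u (dist, q') (adj.getD u [])
      pvLoopA adj maxd st.1 st.2
termination_by pvMeasureA (adj.values.flatten).toFinset (dist, q)
decreasing_by
  · simp only [pvMeasureA, List.length_cons]; omega
  · have h1 := pvInnerA_measure (adj.values.flatten).toFinset u (dist, q') (adj.getD u [])
      (fun v hv => List.mem_toFinset.mpr (pvAdj_getD_mem_flatten adj u v hv))
    simp only [pvMeasureA, List.length_cons] at *
    omega

def bfs_metrics (adj : List (String × List String)) (src : String) (max_depth : Int) :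
    List String × (List (String × Int)) × Int :=
  let adjD : PySem.Dict String (List String) := PySem.Dict.mk adj
  let dist := pvLoopA adjD max_depth ((PySem.Dict.empty.insert src (0 : Int))) [src]
  let reachable := PySem.Set.diff (PySem.Set.ofList dist.keys) (PySem.Set.ofList [src])
  let max_hops := match PySem.List.max? dist.values (fun x => x) with
    | some m => m
    | none => 0
  (reachable, dist.items, max_hops)

-- ===== PORT B =====
-- inner 'for v in adj.get(u, ()):' loop of B; state = (dist, nxt), inserted value is the level d+1
def pvInnerB (dval : Int) (st : PySem.Dict String Int × List String) (vs : List String) :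
    PySem.Dict String Int × List String :=
  vs.foldl (fun st v =>
    if st.1.contains v then st
    else (st.1.insert v dval, st.2 ++ [v])) st

-- 'for u in frontier:' of B
def pvExpandB (adj : PySem.Dict String (List String)) (dval : Int)
    (st : PySem.Dict String Int × List String) (frontier : List String) :
    PySem.Dict String Int × List String :=
  frontier.foldl (fun st u => pvInnerB dval st (adj.getD u [])) st

-- B's 'while d < max_depth and frontier:' level loop
def pvLevelB (adj : PySem.Dict String (List String)) (maxd : Int)
    (dist : PySem.Dict String Int) (frontier : List String) (d : Int) :
    PySem.Dict String Int :=
  if h : d < maxd ∧ frontier ≠ [] then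
    let st := pvExpandB adj (d + 1) (dist, []) frontier
    pvLevelB adj maxd st.1 st.2 (d + 1)
  else dist
termination_by (maxd - d).toNat
decreasing_by omega

def bfs_metrics_alt (adj : List (String × List String)) (src : String) (max_depth : Int) :
    List String × (List (String × Int)) × Int :=
  let adjD : PySem.Dict String (List String) := PySem.Dict.mk adj
  let dist := pvLevelB adjD max_depth ((PySem.Dict.empty.insert src (0 : Int))) [src] 0
  let reachable := PySem.Set.diff (PySem.Set.ofList dist.keys) (PySem.Set.ofList [src])
  let max_hops := match PySem.List.max? dist.values (fun x => x) with
    | some m => m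
    | none => 0
  (reachable, dist.items, max_hops)

-- ===== PRECONDITION & SPEC =====
def Spec_bfs_metrics (adj : List (String × List String)) (src : String) (max_depth : Int) (out : List String × (List (String × Int)) × Int) : Prop := out = bfs_metrics_alt adj src max_depth
instance (adj : List (String × List String)) (src : String) (max_depth : Int) (out : List String × (List (String × Int)) × Int) : Decidable (Spec_bfs_metrics adj src max_depth out) := by unfold Spec_bfs_metrics; infer_instance

-- ===== CLAIM (what is proved, stated in full; the proofs are below) =====
def Claim_equal_bfs_metrics : Prop := ∀ (adj : List (String × List String)) (src : String) (max_depth : Int), Dom_bfs_metrics adj src max_depth → Spec_bfs_metrics adj src max_depth (bfs_metrics adj src max_depth)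

-- ===== LEMMAS AND PROOFS =====

-- A's inner loop on queue 'q ++ nxt' is B's inner loop on 'nxt', with the queue prefix 'q' untouched
theorem pvInnerAB (vs : List String) (u : String) (d : Int) :
    ∀ (dist : PySem.Dict String Int) (q nxt : List String), dist.get? u = some d →
    pvInnerA u (dist, q ++ nxt) vs =
      ((pvInnerB (d + 1) (dist, nxt) vs).1, q ++ (pvInnerB (d + 1) (dist, nxt) vs).2) := by
  induction vs with
  | nil => intro dist q nxt _; simp [pvInnerA, pvInnerB]
  | cons v vs ih =>
    intro dist q nxt hu
    by_cases hc : dist.contains v = true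
    · simpa [pvInnerA, pvInnerB, hc] using ih dist q nxt hu
    · have hc' : dist.contains v = false := by simpa using hc
      have hvu : u ≠ v := by
        intro h
        rw [h] at hu
        have : dist.contains v = true := by
          rw [PySem.Dict.contains_eq_isSome_get?, hu]; rfl
        simp [this] at hc'
      have hgd : dist.getD u 0 = d := PySem.Dict.getD_of_get?_eq_some _ _ hu
      have hu' : (dist.insert v (d + 1)).get? u = some d := by
        simp [PySem.Dict.get?_insert, hvu, hu]
      simp only [pvInnerA, pvInnerB, List.foldl_cons, hc', hgd, Bool.false_eq_true, if_false]
      have := ih (dist.insert v (d + 1)) q (nxt ++ [v]) hu'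
      simpa [pvInnerA, pvInnerB, List.append_assoc] using this

theorem pvInnerB_pres (dval : Int) (vs : List String) :
    ∀ (st : PySem.Dict String Int × List String) (k : String) (x : Int),
      st.1.get? k = some x → ((pvInnerB dval st vs).1).get? k = some x := by
  induction vs with
  | nil => intro st k x h; simpa [pvInnerB] using h
  | cons v vs ih =>
    intro st k x h
    by_cases hc : st.1.contains v = true
    · simpa [pvInnerB, hc] using ih st k x h
    · have hc' : st.1.contains v = false := by simpa using hc
      have hkv : k ≠ v := by
        intro he
        rw [he] at h
        have : st.1.contains v = true := by
          rw [PySem.Dict.contains_eq_isSome_get?, h]; rfl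
        simp [this] at hc'
      simp only [pvInnerB, List.foldl_cons, hc', Bool.false_eq_true, if_false]
      exact ih (st.1.insert v dval, st.2 ++ [v]) k x
        (by simp only [] ; simpa [PySem.Dict.get?_insert, hkv] using h)

theorem pvInnerB_news (dval : Int) (vs : List String) :
    ∀ (st : PySem.Dict String Int × List String),
      (∀ w ∈ st.2, st.1.get? w = some dval) →
      ∀ w ∈ (pvInnerB dval st vs).2, ((pvInnerB dval st vs).1).get? w = some dval := by
  induction vs with
  | nil => intro st h w hw; simpa [pvInnerB] using h w (by simpa [pvInnerB] using hw)
  | cons v vs ih =>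
    intro st h
    by_cases hc : st.1.contains v = true
    · intro w hw
      simp only [pvInnerB, List.foldl_cons, hc, if_true] at hw ⊢
      exact ih st h w hw
    · have hc' : st.1.contains v = false := by simpa using hc
      intro w hw
      simp only [pvInnerB, List.foldl_cons, hc', Bool.false_eq_true, if_false] at hw ⊢
      refine ih (st.1.insert v dval, st.2 ++ [v]) ?_ w hw
      intro w' hw'
      rcases List.mem_append.mp hw' with hw'' | hw''
      · have hne : w' ≠ v := by
          intro he
          have := h w' hw''
          rw [he] at this
          have hcv : st.1.contains v = true := by
            rw [PySem.Dict.contains_eq_isSome_get?, this]; rfl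
          simp [hcv] at hc'
        show (st.1.insert v dval).get? w' = some dval
        simpa [PySem.Dict.get?_insert, hne] using h w' hw''
      · have hv' : w' = v := by simpa using hw''
        show (st.1.insert v dval).get? w' = some dval
        rw [hv']
        exact PySem.Dict.get?_insert_self _ _ _

theorem pvExpandB_news (adj : PySem.Dict String (List String)) (dval : Int) (fr : List String) :
    ∀ (st : PySem.Dict String Int × List String),
      (∀ w ∈ st.2, st.1.get? w = some dval) →
      ∀ w ∈ (pvExpandB adj dval st fr).2, ((pvExpandB adj dval st fr).1).get? w = some dval := by
  induction fr with
  | nil => intro st h w hw; exact h w hw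
  | cons u fr ih =>
    intro st h
    simp only [pvExpandB, List.foldl_cons] at *
    exact ih _ (pvInnerB_news dval _ st h)

-- draining the queue once every pending node is at depth ≥ maxd
theorem pvLoopA_drain (adj : PySem.Dict String (List String)) (maxd : Int) :
    ∀ (q : List String) (dist : PySem.Dict String Int),
      (∀ u ∈ q, ∃ x, dist.get? u = some x ∧ maxd ≤ x) →
      pvLoopA adj maxd dist q = dist := by
  intro q
  induction q with
  | nil => intro dist _; simp [pvLoopA]
  | cons u q ih =>
    intro dist h
    obtain ⟨x, hx, hge⟩ := h u (by simp)
    have hgd : dist.getD u 0 = x := PySem.Dict.getD_of_get?_eq_some _ _ hx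
    rw [pvLoopA, hgd, if_pos hge]
    exact ih dist (fun u' hu' => h u' (by simp [hu']))

-- one level of A's queue loop is one pvExpandB step
theorem pvLevelStep (adj : PySem.Dict String (List String)) (maxd d : Int) (hd : d < maxd) :
    ∀ (fr : List String) (dist : PySem.Dict String Int) (nxt : List String),
      (∀ u ∈ fr, dist.get? u = some d) →
      pvLoopA adj maxd dist (fr ++ nxt) =
        pvLoopA adj maxd (pvExpandB adj (d + 1) (dist, nxt) fr).1
          (pvExpandB adj (d + 1) (dist, nxt) fr).2 := by
  intro fr
  induction fr with
  | nil => intro dist nxt _; simp [pvExpandB]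
  | cons u fr ih =>
    intro dist nxt h
    have hu : dist.get? u = some d := h u (by simp)
    have hgd : dist.getD u 0 = d := PySem.Dict.getD_of_get?_eq_some _ _ hu
    have hnge : ¬ dist.getD u 0 ≥ maxd := by rw [hgd]; omega
    rw [List.cons_append, pvLoopA, if_neg hnge]
    have hrw := pvInnerAB (adj.getD u []) u d dist fr nxt hu
    simp only [hrw]
    have hpres : ∀ u' ∈ fr, ((pvInnerB (d + 1) (dist, nxt) (adj.getD u [])).1).get? u' = some d :=
      fun u' hu' => pvInnerB_pres (d + 1) (adj.getD u []) (dist, nxt) u' d (h u' (by simp [hu']))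
    rw [ih _ _ hpres]
    rfl

theorem pvLoopA_eq_pvLevelB (adj : PySem.Dict String (List String)) (maxd : Int) :
    ∀ (n : Nat) (d : Int) (dist : PySem.Dict String Int) (fr : List String),
      (maxd - d).toNat ≤ n →
      (∀ u ∈ fr, dist.get? u = some d) →
      pvLoopA adj maxd dist fr = pvLevelB adj maxd dist fr d := by
  intro n
  induction n with
  | zero =>
    intro d dist fr hn h
    have hnd : ¬ d < maxd := by omega
    rw [pvLevelB, dif_neg (by intro hc; exact hnd hc.1)]
    exact pvLoopA_drain adj maxd fr dist (fun u hu => ⟨d, h u hu, by omega⟩)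
  | succ m ih =>
    intro d dist fr hn h
    by_cases hcond : d < maxd ∧ fr ≠ []
    · rw [pvLevelB, dif_pos hcond]
      have hstep := pvLevelStep adj maxd d hcond.1 fr dist [] h
      rw [List.append_nil] at hstep
      rw [hstep]
      exact ih (d + 1) _ _ (by omega)
        (pvExpandB_news adj (d + 1) fr (dist, []) (by simp))
    · rw [pvLevelB, dif_neg hcond]
      rcases Decidable.not_and_iff_or_not.mp hcond with hnd | hfr
      · exact pvLoopA_drain adj maxd fr dist (fun u hu => ⟨d, h u hu, by omega⟩)
      · have : fr = [] := by simpa using hfr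
        rw [this, pvLoopA]

theorem pvInit_get? (src : String) :
    ((PySem.Dict.empty.insert src (0 : Int))).get? src = some 0 :=
  PySem.Dict.get?_insert_self _ _ _

-- ===== VERDICT (by name: the statement is the Claim_ definition above) =====
theorem bfs_metrics_spec : Claim_equal_bfs_metrics := by
  intro adj src maxd _
  unfold Spec_bfs_metrics bfs_metrics bfs_metrics_alt
  have h := pvLoopA_eq_pvLevelB (PySem.Dict.mk adj) maxd (maxd - 0).toNat 0
    ((PySem.Dict.empty.insert src (0 : Int))) [src] (le_refl _)
    (by intro u hu; simp only [List.mem_singleton] at hu; rw [hu]; exact pvInit_get? src)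
  simp only [h]
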